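-- pv_equiv track=rewrite | github.com/rslabon/aoc2024 | test/aoc2024/day25.py | parse_heights
-- ===== SOURCE A (Python) =====
-- from collections import Counter
--
-- def parse_heights(s):
--     lines = s.strip().splitlines()
--
--     trim_bottom_and_top = lines[1:-1]
--     rotated = [[0] * len(trim_bottom_and_top) for _ in range(len(lines[0]))]
--     for row, line in enumerate(trim_bottom_and_top):
--         for col, val in enumerate(line):
--             rotated[col][row] = val
--
--     heights = []
--     for row in rotated:
--         heights.append(Counter(row).get("#", 0))
--
--     if set(lines[0]) == {'#'}:
--         return "lock", heights
--
--     return "key", heights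
-- ===== SOURCE B (Python) =====
-- def parse_heights(s):
--     lines = s.strip().splitlines()
--     heights = [0] * len(lines[0])
--     for line in lines[1:-1]:
--         for col, ch in enumerate(line):
--             if ch == "#":
--                 heights[col] += 1
--     if lines[0] and all(c == "#" for c in lines[0]):
--         return "lock", heights
--     return "key", heights
-- ===== Notes on version B (the rewrite author's own statement) =====
-- stated objective: simpler
-- what changed: B drops the explicit transpose matrix and the per-column Counter entirely and accumulates the per-column hash-mark counts in a single pass over the inner lines, with a plain emptiness-plus-all check for the lock label.
import Mathlib
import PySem

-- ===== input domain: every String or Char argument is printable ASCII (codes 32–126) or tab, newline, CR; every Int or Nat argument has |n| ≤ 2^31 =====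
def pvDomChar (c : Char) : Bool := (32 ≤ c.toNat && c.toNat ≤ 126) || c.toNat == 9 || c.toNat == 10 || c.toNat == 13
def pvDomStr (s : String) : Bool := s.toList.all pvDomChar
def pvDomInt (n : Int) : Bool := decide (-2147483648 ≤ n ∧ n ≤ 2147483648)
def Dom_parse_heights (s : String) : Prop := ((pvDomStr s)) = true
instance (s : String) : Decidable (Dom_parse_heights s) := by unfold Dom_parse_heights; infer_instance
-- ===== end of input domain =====

-- B drops A's transpose matrix and Counter pass and accumulates the column counts in one pass (objective: simpler).

-- ===== PORT A =====
-- A matrix cell: Python's initial int 0, or a single-character string written over it.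
inductive Cell
  | zero
  | ch : Char → Cell
deriving DecidableEq

def parse_heights (s : String) : String × List Int :=
  let lines := PySem.Str.splitlines (PySem.Str.strip s)
  -- lines[0]: pyGetD is exact under Pre_ (lines ≠ [])
  let line0 := (PySem.List.pyGetD lines 0 "").toList
  let trim := PySem.List.slice lines (some 1) (some (-1))
  let rotated0 : List (List Cell) :=
    (List.range line0.length).map (fun _ => List.replicate trim.length Cell.zero)
  -- rotated[col][row] = val: pySetD/pyGetD are exact under Pre_ (every col < len(lines[0]))
  let rotated :=
    (PySem.List.enumerate trim 0).foldl (fun rot p =>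
      (PySem.List.enumerate p.2.toList 0).foldl (fun rot q =>
        PySem.List.pySetD rot q.1
          (PySem.List.pySetD (PySem.List.pyGetD rot q.1 []) p.1 (Cell.ch q.2))) rot) rotated0
  let heights := rotated.map (fun row => (PySem.Dict.counter row).getD (Cell.ch '#') 0)
  if PySem.Set.equal (PySem.Set.ofList line0) (PySem.Set.ofList ['#']) then
    ("lock", heights)
  else
    ("key", heights)

-- ===== PORT B =====
def parse_heights_alt (s : String) : String × List Int :=
  let lines := PySem.Str.splitlines (PySem.Str.strip s)
  -- lines[0]: pyGetD is exact under Pre_ (lines ≠ [])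
  let line0 := (PySem.List.pyGetD lines 0 "").toList
  -- heights[col] += 1: pySetD/pyGetD are exact under Pre_ (every col < len(lines[0]))
  let heights :=
    (PySem.List.slice lines (some 1) (some (-1))).foldl (fun hs line =>
      (PySem.List.enumerate line.toList 0).foldl (fun hs q =>
        if q.2 = '#' then PySem.List.pySetD hs q.1 (PySem.List.pyGetD hs q.1 0 + 1) else hs) hs)
      (List.replicate line0.length (0 : Int))
  if line0 ≠ [] ∧ line0.all (· == '#') = true then ("lock", heights)
  else ("key", heights)

-- ===== PRECONDITION & SPEC =====
-- Pre_ excludes exactly the inputs on which A raises IndexError: a string whose stripped text is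
-- empty (lines[0]) or that has an inner line longer than the first line (rotated[col]).
def Pre_parse_heights (s : String) : Prop :=
  let lines := PySem.Str.splitlines (PySem.Str.strip s)
  lines ≠ [] ∧ ∀ line ∈ PySem.List.slice lines (some 1) (some (-1)),
    line.toList.length ≤ (PySem.List.pyGetD lines 0 "").toList.length
instance (s : String) : Decidable (Pre_parse_heights s) := by unfold Pre_parse_heights; infer_instance

def pvWitness_parse_heights : String := "#####\n.####\n....."

def Spec_parse_heights (s : String) (out : String × List Int) : Prop := out = parse_heights_alt s
instance (s : String) (out : String × List Int) : Decidable (Spec_parse_heights s out) := by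
  unfold Spec_parse_heights; infer_instance

-- ===== CLAIM (what is proved, stated in full; the proofs are below) =====
def Claim_equal_parse_heights : Prop :=
  ∀ (s : String), Dom_parse_heights s → Pre_parse_heights s → Spec_parse_heights s (parse_heights s)

-- ===== LEMMAS AND PROOFS =====

theorem getD_set_eq {α : Type} (l : List α) (i j : Nat) (v d : α) :
    (l.set i v).getD j d = if j = i ∧ i < l.length then v else l.getD j d := by
  by_cases h : j = i
  · subst h
    by_cases hi : j < l.length
    · simp [List.getD_eq_getElem?_getD, List.getElem?_set, hi]
    · simp [List.getD_eq_getElem?_getD, List.getElem?_set, hi]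
  · simp [List.getD_eq_getElem?_getD, List.getElem?_set, h, Ne.symm h]

theorem getD_replicate' {α : Type} (n j : Nat) (a d : α) :
    (List.replicate n a).getD j d = if j < n then a else d := by
  by_cases h : j < n
  · simp [List.getD_eq_getElem?_getD, h]
  · simp [List.getD_eq_getElem?_getD, h]

theorem count_set_zero (l : List Cell) (i : Nat) (v : Cell)
    (h : i < l.length) (hz : l.getD i Cell.zero = Cell.zero) :
    (l.set i v).count (Cell.ch '#') =
      l.count (Cell.ch '#') + (if v = Cell.ch '#' then 1 else 0) := by
  induction l generalizing i with
  | nil => simp at h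
  | cons a t ih =>
    cases i with
    | zero =>
      have ha : a = Cell.zero := by simpa using hz
      subst ha
      rcases eq_or_ne v (Cell.ch '#') with hv | hv <;> simp [List.count_cons, hv]
    | succ n =>
      have hz' : t.getD n Cell.zero = Cell.zero := by simpa using hz
      have := ih n (by simpa using h) hz'
      simp [List.count_cons, this]
      omega

theorem inner_inv (row : Nat) (line : List Char) :
    ∀ (k : Nat) (rot : List (List Cell)) (hs : List Int),
    k + line.length ≤ rot.length →
    hs.length = rot.length →
    (∀ j : Nat, hs.getD j 0 = ((rot.getD j []).count (Cell.ch '#') : Int)) →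
    (∀ j : Nat, j < rot.length → row < (rot.getD j []).length) →
    (∀ j r : Nat, row < r → (rot.getD j []).getD r Cell.zero = Cell.zero) →
    (∀ j : Nat, k ≤ j → (rot.getD j []).getD row Cell.zero = Cell.zero) →
    ((PySem.List.enumerate line (k : Int)).foldl
        (fun hs q => if q.2 = '#' then PySem.List.pySetD hs q.1 (PySem.List.pyGetD hs q.1 0 + 1) else hs)
        hs).length = hs.length ∧
    ((PySem.List.enumerate line (k : Int)).foldl
        (fun rot q => PySem.List.pySetD rot q.1
          (PySem.List.pySetD (PySem.List.pyGetD rot q.1 []) ((row : Nat) : Int) (Cell.ch q.2)))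
        rot).length = rot.length ∧
    (∀ j : Nat,
      (((PySem.List.enumerate line (k : Int)).foldl
        (fun rot q => PySem.List.pySetD rot q.1
          (PySem.List.pySetD (PySem.List.pyGetD rot q.1 []) ((row : Nat) : Int) (Cell.ch q.2)))
        rot).getD j []).length = (rot.getD j []).length) ∧
    (∀ j : Nat,
      ((PySem.List.enumerate line (k : Int)).foldl
        (fun hs q => if q.2 = '#' then PySem.List.pySetD hs q.1 (PySem.List.pyGetD hs q.1 0 + 1) else hs)
        hs).getD j 0 =
      ((((PySem.List.enumerate line (k : Int)).foldl
        (fun rot q => PySem.List.pySetD rot q.1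
          (PySem.List.pySetD (PySem.List.pyGetD rot q.1 []) ((row : Nat) : Int) (Cell.ch q.2)))
        rot).getD j []).count (Cell.ch '#') : Int)) ∧
    (∀ j r : Nat, row < r →
      (((PySem.List.enumerate line (k : Int)).foldl
        (fun rot q => PySem.List.pySetD rot q.1
          (PySem.List.pySetD (PySem.List.pyGetD rot q.1 []) ((row : Nat) : Int) (Cell.ch q.2)))
        rot).getD j []).getD r Cell.zero = Cell.zero) := by
  induction line with
  | nil =>
    intro k rot hs _ _ h3 _ h5 _
    simp only [PySem.List.enumerate_nil, List.foldl_nil]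
    refine ⟨?_, ?_, ?_, h3, h5⟩ <;> simp
  | cons c rest ih =>
    intro k rot hs H1 H2 H3 H4 H5 H6
    have hk : k < rot.length := by simp at H1; omega
    have hkhs : k < hs.length := by omega
    rw [PySem.List.enumerate_cons]
    simp only [List.foldl_cons]
    have hstepA : PySem.List.pySetD rot ((k : Nat) : Int)
          (PySem.List.pySetD (PySem.List.pyGetD rot ((k : Nat) : Int) []) ((row : Nat) : Int) (Cell.ch c))
        = rot.set k ((rot.getD k []).set row (Cell.ch c)) := by
      simp
    have hstepB : (if c = '#' then PySem.List.pySetD hs ((k : Nat) : Int) (PySem.List.pyGetD hs ((k : Nat) : Int) 0 + 1) else hs)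
        = if c = '#' then hs.set k (hs.getD k 0 + 1) else hs := by
      split <;> simp
    rw [hstepA, hstepB]
    have push : ((k : Int) + 1) = (((k + 1 : Nat)) : Int) := by omega
    rw [push]
    have hrotget : ∀ i : Nat,
        (rot.set k ((rot.getD k []).set row (Cell.ch c))).getD i [] =
          if i = k then (rot.getD k []).set row (Cell.ch c) else rot.getD i [] := by
      intro i
      rw [getD_set_eq]
      by_cases hik : i = k
      · simp [hik, hk]
      · simp [hik]
    have hcnt := count_set_zero (rot.getD k []) row (Cell.ch c) (H4 k hk) (H6 k (le_refl k))
    have key := ih (k + 1) (rot.set k ((rot.getD k []).set row (Cell.ch c)))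
      (if c = '#' then hs.set k (hs.getD k 0 + 1) else hs)
      (by simp at H1 ⊢; omega)
      (by split <;> simp [H2])
      (by
        intro i
        rw [hrotget i]
        by_cases hik : i = k
        · subst hik
          by_cases hc : c = '#'
          · rw [if_pos hc, if_pos rfl, getD_set_eq, if_pos ⟨rfl, hkhs⟩, hcnt, hc,
              if_pos rfl, H3 i]
            omega
          · rw [if_neg hc, if_pos rfl, hcnt, H3 i, if_neg (by simp [hc])]
            omega
        · rw [if_neg hik]
          by_cases hc : c = '#'
          · rw [if_pos hc, getD_set_eq, if_neg (by simp [hik]), H3 i]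
          · rw [if_neg hc]; exact H3 i)
      (by
        intro i hi
        rw [hrotget i]
        by_cases hik : i = k
        · subst hik; simpa using H4 i hk
        · rw [if_neg hik]; exact H4 i (by simpa using hi))
      (by
        intro i r hr
        rw [hrotget i]
        by_cases hik : i = k
        · subst hik
          rw [if_pos rfl, getD_set_eq]
          rw [if_neg (by intro hc; omega)]
          exact H5 i r hr
        · rw [if_neg hik]; exact H5 i r hr)
      (by
        intro i hi
        rw [hrotget i, if_neg (by omega)]
        exact H6 i (by omega))
    obtain ⟨K1, K2, K3, K4, K5⟩ := key
    refine ⟨?_, ?_, ?_, K4, K5⟩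
    · rw [K1]; split <;> simp
    · rw [K2]; simp
    · intro i
      rw [K3 i, hrotget i]
      by_cases hik : i = k
      · subst hik; simp
      · rw [if_neg hik]

theorem outer_inv (ls : List String) :
    ∀ (row n : Nat) (rot : List (List Cell)) (hs : List Int),
    row + ls.length ≤ n →
    (∀ l ∈ ls, l.toList.length ≤ rot.length) →
    hs.length = rot.length →
    (∀ j : Nat, hs.getD j 0 = ((rot.getD j []).count (Cell.ch '#') : Int)) →
    (∀ j : Nat, j < rot.length → (rot.getD j []).length = n) →
    (∀ j r : Nat, row ≤ r → (rot.getD j []).getD r Cell.zero = Cell.zero) →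
    (ls.foldl
        (fun hs line => (PySem.List.enumerate line.toList 0).foldl
          (fun hs q => if q.2 = '#' then PySem.List.pySetD hs q.1 (PySem.List.pyGetD hs q.1 0 + 1) else hs) hs)
        hs).length = hs.length ∧
    ((PySem.List.enumerate ls ((row : Nat) : Int)).foldl
        (fun rot p => (PySem.List.enumerate p.2.toList 0).foldl
          (fun rot q => PySem.List.pySetD rot q.1
            (PySem.List.pySetD (PySem.List.pyGetD rot q.1 []) p.1 (Cell.ch q.2))) rot)
        rot).length = rot.length ∧
    (∀ j : Nat,
      (ls.foldl
        (fun hs line => (PySem.List.enumerate line.toList 0).foldl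
          (fun hs q => if q.2 = '#' then PySem.List.pySetD hs q.1 (PySem.List.pyGetD hs q.1 0 + 1) else hs) hs)
        hs).getD j 0 =
      ((((PySem.List.enumerate ls ((row : Nat) : Int)).foldl
        (fun rot p => (PySem.List.enumerate p.2.toList 0).foldl
          (fun rot q => PySem.List.pySetD rot q.1
            (PySem.List.pySetD (PySem.List.pyGetD rot q.1 []) p.1 (Cell.ch q.2))) rot)
        rot).getD j []).count (Cell.ch '#') : Int)) := by
  induction ls with
  | nil =>
    intro row n rot hs _ _ _ h4 _ _
    simp only [PySem.List.enumerate_nil, List.foldl_nil]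
    refine ⟨?_, ?_, h4⟩ <;> simp
  | cons l ls' ih =>
    intro row n rot hs H1 H2 H3 H4 H5 H6
    rw [PySem.List.enumerate_cons]
    simp only [List.foldl_cons]
    obtain ⟨S1, S2, S3, S4, S5⟩ := inner_inv row l.toList 0 rot hs
      (by simpa using H2 l (by simp))
      H3 H4
      (by
        intro j hj
        rw [H5 j hj]
        simp at H1
        omega)
      (by intro j r hr; exact H6 j r (by omega))
      (by intro j _; exact H6 j row (le_refl row))
    obtain ⟨K1, K2, K3⟩ := ih (row + 1) n
      ((PySem.List.enumerate l.toList (((0 : Nat)) : Int)).foldl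
        (fun rot q => PySem.List.pySetD rot q.1
          (PySem.List.pySetD (PySem.List.pyGetD rot q.1 []) ((row : Nat) : Int) (Cell.ch q.2))) rot)
      ((PySem.List.enumerate l.toList (((0 : Nat)) : Int)).foldl
        (fun hs q => if q.2 = '#' then PySem.List.pySetD hs q.1 (PySem.List.pyGetD hs q.1 0 + 1) else hs) hs)
      (by simp at H1 ⊢; omega)
      (by intro x hx; rw [S2]; exact H2 x (by simp [hx]))
      (by rw [S1, S2]; exact H3)
      S4
      (by intro j hj; rw [S3 j]; exact H5 j (by rw [← S2]; exact hj))
      (by intro j r hr; exact S5 j r (by omega))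
    exact ⟨K1.trans S1, K2.trans S2, K3⟩

theorem label_iff (l : List Char) :
    (PySem.Set.equal (PySem.Set.ofList l) (PySem.Set.ofList ['#']) = true) ↔
      (l ≠ [] ∧ l.all (· == '#') = true) := by
  rw [show PySem.Set.ofList ['#'] = ['#'] from rfl]
  simp only [PySem.Set.equal, PySem.Set.issubset, PySem.Set.contains, Bool.and_eq_true,
    List.all_eq_true, List.contains_eq_mem, decide_eq_true_eq, List.mem_singleton,
    PySem.Set.mem_ofList, beq_iff_eq]
  constructor
  · rintro ⟨h1, h2⟩
    have h2' : '#' ∈ l := by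
      have := h2 '#' (by simp)
      simpa using this
    exact ⟨List.ne_nil_of_mem h2', h1⟩
  · rintro ⟨h1, h2⟩
    refine ⟨h2, ?_⟩
    intro x hx
    obtain ⟨a, t, rfl⟩ := List.exists_cons_of_ne_nil h1
    have ha : a = '#' := h2 a (by simp)
    have hx' : x = '#' := by simpa using hx
    subst hx'
    rw [← ha]
    exact List.mem_cons_self ..

theorem list_eq_of_getD {α : Type} (xs : List α) : ∀ (ys : List α) (d : α),
    xs.length = ys.length → (∀ j : Nat, xs.getD j d = ys.getD j d) → xs = ys := by
  induction xs with
  | nil =>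
    intro ys d hlen _
    cases ys with
    | nil => rfl
    | cons b t => simp at hlen
  | cons a t ih =>
    intro ys d hlen h
    cases ys with
    | nil => simp at hlen
    | cons b u =>
      have h0 : a = b := by simpa using h 0
      have ht : t = u := ih u d (by simpa using hlen) (fun j => by simpa using h (j + 1))
      rw [h0, ht]

theorem map_count_getD (rot : List (List Cell)) : ∀ (j : Nat),
    (rot.map (fun row => (PySem.Dict.counter row).getD (Cell.ch '#') 0)).getD j 0 =
      ((rot.getD j []).count (Cell.ch '#') : Int) := by
  induction rot with
  | nil => intro j; simp
  | cons r t ih =>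
    intro j
    cases j with
    | zero => simp [PySem.Dict.getD_counter]
    | succ n => simpa using ih n

-- ===== VERDICT =====
set_option maxHeartbeats 1000000 in
theorem parse_heights_spec : Claim_equal_parse_heights := by
  intro s _ hpre
  obtain ⟨hne, hbound⟩ := hpre
  unfold Spec_parse_heights parse_heights parse_heights_alt
  dsimp only
  set L := PySem.Str.splitlines (PySem.Str.strip s) with hLdef
  set T := PySem.List.slice L (some 1) (some (-1)) with hTdef
  set W := (PySem.List.pyGetD L 0 "").toList with hWdef
  obtain ⟨M1, M2, M3⟩ := outer_inv T 0 T.length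
    (List.replicate W.length (List.replicate T.length Cell.zero))
    (List.replicate W.length (0 : Int))
    (by omega)
    (by intro x hx; simpa using hbound x hx)
    (by simp)
    (by
      intro j
      by_cases hj : j < W.length <;>
        simp [getD_replicate', hj, List.count_replicate])
    (by
      intro j hj
      simp only [List.length_replicate] at hj
      rw [getD_replicate', if_pos hj]
      simp)
    (by
      intro j r _
      rw [getD_replicate']
      split_ifs with h
      · rw [getD_replicate']
        split_ifs <;> rfl
      · rfl)
  simp only [Nat.cast_zero] at M1 M2 M3
  have hrot0 : (List.range W.length).map (fun _ => List.replicate T.length Cell.zero) =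
      List.replicate W.length (List.replicate T.length Cell.zero) := by
    simp
  rw [hrot0]
  have hAeq :
      (((PySem.List.enumerate T (0 : Int)).foldl
        (fun rot p => (PySem.List.enumerate p.2.toList 0).foldl
          (fun rot q => PySem.List.pySetD rot q.1
            (PySem.List.pySetD (PySem.List.pyGetD rot q.1 []) p.1 (Cell.ch q.2))) rot)
        (List.replicate W.length (List.replicate T.length Cell.zero))).map
        (fun row => (PySem.Dict.counter row).getD (Cell.ch '#') 0)) =
      (T.foldl
        (fun hs line => (PySem.List.enumerate line.toList 0).foldl
          (fun hs q => if q.2 = '#' then PySem.List.pySetD hs q.1 (PySem.List.pyGetD hs q.1 0 + 1) else hs) hs)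
        (List.replicate W.length (0 : Int))) := by
    apply list_eq_of_getD _ _ (0 : Int)
    · rw [List.length_map, M2, M1]
      simp
    · intro j
      rw [map_count_getD]
      exact (M3 j).symm
  split_ifs with h1 h2 h2
  · exact congrArg (Prod.mk "lock") hAeq
  · exact absurd ((label_iff W).mp h1) h2
  · exact absurd ((label_iff W).mpr h2) h1
  · exact congrArg (Prod.mk "key") hAeq
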